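-- pv_equiv track=rewrite | github.com/mjdgv/projects | n-dimensional minesweeper/lab.py | get_neighbors
-- ===== SOURCE A (Python) =====
-- def get_neighbors(coord, dimension):
--     """
--     Returns all the neighbors of a given set of coordinates in a given game
--     """
--     directions = (1, 0, -1)
--     neighbors = []
--
--     if len(coord) == 1:  # base case
--         neighbors = [
--             (d + coord[0],)
--             for d in directions
--             if (d + coord[0] >= 0 and d + coord[0] < dimension[0])
--         ]
--         return neighbors
--     else:
--         next_r = [
--             (d + coord[0],)
--             for d in directions
--             if (d + coord[0] >= 0 and d + coord[0] < dimension[0])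
--         ]
--         next_c = get_neighbors(coord[1:], dimension[1:])
--         temp = []
--         for current in next_r:
--             for digit in next_c:
--                 temp.append(current + digit)
--         neighbors = temp
--         return neighbors
-- ===== SOURCE B (Python) =====
-- def get_neighbors(coord, dimension):
--     """
--     Returns all the neighbors of a given set of coordinates in a given game
--     """
--     options = [
--         [v for v in (coord[i] + 1, coord[i], coord[i] - 1) if 0 <= v < dimension[i]]
--         for i in range(len(coord))
--     ]
--     result = [()]
--     for opts in reversed(options):
--         result = [(v,) + rest for v in opts for rest in result]
--     return result
-- ===== Notes on version B (the rewrite author's own statement) =====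
-- stated objective: idiomatic
-- what changed: Replaced the recursion with nested append loops by a single forward pass building per-dimension option lists, then an iterative back-to-front cartesian product over them.
-- outside the precondition, e.g. on get_neighbors((-2,), ()): A returns [], B returns []
import Mathlib
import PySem

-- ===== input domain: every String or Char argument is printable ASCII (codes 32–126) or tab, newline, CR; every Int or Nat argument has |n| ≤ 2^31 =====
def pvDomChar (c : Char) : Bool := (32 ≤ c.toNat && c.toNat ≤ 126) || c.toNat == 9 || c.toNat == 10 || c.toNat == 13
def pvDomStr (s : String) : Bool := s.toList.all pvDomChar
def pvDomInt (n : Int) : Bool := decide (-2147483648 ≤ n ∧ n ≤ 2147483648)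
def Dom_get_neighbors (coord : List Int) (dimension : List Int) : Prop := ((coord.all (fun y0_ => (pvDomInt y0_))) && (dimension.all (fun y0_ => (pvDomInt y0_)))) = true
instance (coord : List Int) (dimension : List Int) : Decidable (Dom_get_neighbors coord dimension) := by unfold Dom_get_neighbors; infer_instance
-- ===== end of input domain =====

-- B replaces A's recursion over dimensions by per-dimension option lists folded into an
-- iterative back-to-front cartesian product (idiomatic decomposition; no speed claim).


-- ===== PORT A =====
-- literal port of A; the [] case is where Python raises IndexError (excluded by Pre_)
def get_neighbors : List Int → List Int → List (List Int)
  | [], _ => []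
  | c0 :: rest, dimension =>
    let d0 := (PySem.List.pyGet? dimension 0).getD 0
    let next_r := ([1, 0, -1] : List Int).foldl
      (fun acc d => if 0 ≤ d + c0 ∧ d + c0 < d0 then acc ++ [[d + c0]] else acc) []
    if rest.isEmpty then next_r
    else
      let next_c := get_neighbors rest (dimension.drop 1)
      next_r.foldl (fun temp current =>
        next_c.foldl (fun temp digit => temp ++ [current ++ digit]) temp) []

-- ===== PORT B =====
-- the comprehension body of Source B's `options`, at index i
def pvOptAt (coord : List Int) (dimension : List Int) (i : Nat) : List Int :=
  let c := (PySem.List.pyGet? coord (i : Int)).getD 0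
  let d := (PySem.List.pyGet? dimension (i : Int)).getD 0
  ([c + 1, c, c - 1] : List Int).filter (fun v => decide (0 ≤ v) && decide (v < d))

-- one step of Source B's product loop: result = [(v,) + rest for v in opts for rest in result]
def pvStep (result : List (List Int)) (opts : List Int) : List (List Int) :=
  opts.flatMap (fun v => result.map (fun rest => v :: rest))

def get_neighbors_alt (coord : List Int) (dimension : List Int) : List (List Int) :=
  let options := (List.range coord.length).map (pvOptAt coord dimension)
  options.reverse.foldl pvStep [[]]

-- ===== PRECONDITION & SPEC =====
-- Pre_ excludes empty coord and dimension shorter than coord: there A raises IndexError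
-- (coord[0] / dimension[0] on the sliced tails), except that when every coordinate past
-- dimension's length is <= -2 the `and` short-circuit lets A return [] - B returns [] too.
def Pre_get_neighbors (coord : List Int) (dimension : List Int) : Prop :=
  coord ≠ [] ∧ coord.length ≤ dimension.length
instance (coord : List Int) (dimension : List Int) : Decidable (Pre_get_neighbors coord dimension) := by unfold Pre_get_neighbors; infer_instance
def pvWitness_get_neighbors : List Int × List Int := ([1, 0], [3, 3])

def Spec_get_neighbors (coord : List Int) (dimension : List Int) (out : List (List Int)) : Prop := out = get_neighbors_alt coord dimension
instance (coord : List Int) (dimension : List Int) (out : List (List Int)) : Decidable (Spec_get_neighbors coord dimension out) := by unfold Spec_get_neighbors; infer_instance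

-- ===== CLAIM (what is proved, stated in full; the proofs are below) =====
def Claim_equal_get_neighbors : Prop := ∀ (coord : List Int) (dimension : List Int), Dom_get_neighbors coord dimension → Pre_get_neighbors coord dimension → Spec_get_neighbors coord dimension (get_neighbors coord dimension)


-- ===== LEMMAS AND PROOFS =====

-- the per-dimension option list both programs compute, in their shared value order
def opts1 (c d : Int) : List Int :=
  ([c + 1, c, c - 1] : List Int).filter (fun v => decide (0 ≤ v) && decide (v < d))

-- A's next_r foldl is the option list wrapped into singletons
lemma nextr_eq (c0 d0 : Int) :
    ([1, 0, -1] : List Int).foldl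
      (fun acc d => if 0 ≤ d + c0 ∧ d + c0 < d0 then acc ++ [[d + c0]] else acc) []
      = (opts1 c0 d0).map (fun v => [v]) := by
  simp only [opts1, List.filter_cons, List.filter_nil, Bool.and_eq_true, decide_eq_true_eq,
    List.foldl]
  have h1 : (1 : Int) + c0 = c0 + 1 := by ring
  have h2 : (0 : Int) + c0 = c0 := by ring
  have h3 : (-1 : Int) + c0 = c0 - 1 := by ring
  rw [h1, h2, h3]
  split_ifs <;> simp

-- A's nested append loops form the flatMap of appended rows
lemma temp_eq (next_r next_c : List (List Int)) :
    next_r.foldl (fun temp current =>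
      next_c.foldl (fun temp digit => temp ++ [current ++ digit]) temp) []
      = next_r.flatMap (fun current => next_c.map (fun digit => current ++ digit)) := by
  have inner : ∀ (cur : List Int) (acc : List (List Int)),
      next_c.foldl (fun temp digit => temp ++ [cur ++ digit]) acc
        = acc ++ next_c.map (fun digit => cur ++ digit) := by
    intro cur acc
    induction next_c generalizing acc with
    | nil => simp
    | cons h t ih => simp [List.foldl, ih]
  have outer : ∀ (acc : List (List Int)),
      next_r.foldl (fun temp current =>
        next_c.foldl (fun temp digit => temp ++ [current ++ digit]) temp) acc
        = acc ++ next_r.flatMap (fun current => next_c.map (fun digit => current ++ digit)) := by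
    intro acc
    induction next_r generalizing acc with
    | nil => simp
    | cons h t ih => simp [List.foldl, inner, ih, List.flatMap_def]
  simpa using outer []

-- the option-list comprehension shifts down one index on the tails
lemma optAt_succ (c0 : Int) (rest : List Int) (d0 : Int) (drest : List Int) (i : Nat) :
    pvOptAt (c0 :: rest) (d0 :: drest) (i + 1) = pvOptAt rest drest i := by
  simp [pvOptAt, PySem.List.pyGet?_natCast]

-- B on a nonempty coordinate: head options flatMapped over B of the tails
lemma altB (c0 : Int) (rest : List Int) (d0 : Int) (drest : List Int) :
    get_neighbors_alt (c0 :: rest) (d0 :: drest)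
      = (opts1 c0 d0).flatMap (fun v =>
          (get_neighbors_alt rest drest).map (fun r => v :: r)) := by
  conv_rhs => rw [get_neighbors_alt]
  rw [get_neighbors_alt]
  simp only [List.length_cons, List.range_succ_eq_map, List.map_cons, List.map_map]
  rw [show List.map (pvOptAt (c0 :: rest) (d0 :: drest) ∘ Nat.succ) (List.range rest.length)
      = List.map (pvOptAt rest drest) (List.range rest.length) from
    List.map_congr_left (fun i _ => optAt_succ c0 rest d0 drest i)]
  simp only [List.reverse_cons, List.foldl_append, List.foldl_cons, List.foldl_nil]
  rw [show pvOptAt (c0 :: rest) (d0 :: drest) 0 = opts1 c0 d0 from by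
    simp [pvOptAt, opts1, PySem.List.pyGet?_zero_cons]]
  rfl

-- the two ports agree on every input Pre_ admits
lemma main_eq : ∀ (coord dimension : List Int), coord ≠ [] →
    coord.length ≤ dimension.length →
    get_neighbors coord dimension = get_neighbors_alt coord dimension := by
  intro coord
  induction coord with
  | nil => intro _ hne _; exact absurd rfl hne
  | cons c0 rest ih =>
    intro dimension _ hlen
    cases dimension with
    | nil => simp at hlen
    | cons d0 drest =>
      simp only [List.length_cons, Nat.add_le_add_iff_right] at hlen
      rw [altB, get_neighbors]
      simp only [PySem.List.pyGet?_zero_cons, Option.getD_some, List.drop_one, List.tail_cons]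
      rw [nextr_eq]
      cases rest with
      | nil =>
        rw [show get_neighbors_alt ([] : List Int) drest = [[]] from rfl]
        simp only [List.map_cons, List.map_nil]
        exact List.map_eq_flatMap
      | cons r1 rs =>
        simp only [List.isEmpty_cons, Bool.false_eq_true, if_false]
        rw [temp_eq, ih drest (by simp) hlen]
        simp [List.flatMap_map, Function.comp]

-- ===== VERDICT (by name: the statement is the Claim_ definition above) =====
theorem get_neighbors_spec : Claim_equal_get_neighbors := by
  intro coord dimension _ hpre
  exact main_eq coord dimension hpre.1 hpre.2
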